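-- pv_equiv track=rewrite | github.com/KuanHsienn/NUS-Lifesaving-Invis | processors/heat_seeding.py | get_lane_order
-- ===== SOURCE A (Python) =====
-- DEFAULT_POOL_LANES = 10
--
-- def get_lane_order(pool_lanes: int = DEFAULT_POOL_LANES) -> list:
--     """0-indexed lane order. 10-lane: [4,5,6,3,7,2,8,1,9,0]
--     Starts at centre, goes right twice, then alternates left/right."""
--     center = (pool_lanes - 1) // 2
--     order  = [center]
--     r, l   = center + 1, center - 1
--     for _ in range(2):
--         if r <= pool_lanes - 1 and len(order) < pool_lanes:
--             order.append(r); r += 1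
--     go_left = True
--     while len(order) < pool_lanes:
--         if go_left:
--             if l >= 0: order.append(l); l -= 1
--         else:
--             if r <= pool_lanes - 1: order.append(r); r += 1
--         go_left = not go_left
--     return order
-- ===== SOURCE B (Python) =====
-- DEFAULT_POOL_LANES = 10
--
-- def _interleave(left, right):
--     """Alternate left/right, starting with left; drains the surviving side."""
--     out = []
--     for a, b in zip(left, right):
--         out.append(a)
--         out.append(b)
--     k = min(len(left), len(right))
--     return out + left[k:] + right[k:]
--
-- def get_lane_order(pool_lanes: int = DEFAULT_POOL_LANES) -> list:
--     """0-indexed lane order. 10-lane: [4,5,6,3,7,2,8,1,9,0]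
--     Starts at centre, goes right twice, then alternates left/right."""
--     center = (pool_lanes - 1) // 2
--     right = list(range(center + 1, pool_lanes))
--     left = list(range(center - 1, -1, -1))
--     return [center] + right[:2] + _interleave(left, right[2:])
-- ===== Notes on version B (the rewrite author's own statement) =====
-- stated objective: simpler
-- what changed: Replaces the stateful pointer/toggle while-loop with two precomputed lane runs (right ascending, left descending) merged by a zip-based interleave after taking the centre and the first two right lanes.
import Mathlib
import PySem

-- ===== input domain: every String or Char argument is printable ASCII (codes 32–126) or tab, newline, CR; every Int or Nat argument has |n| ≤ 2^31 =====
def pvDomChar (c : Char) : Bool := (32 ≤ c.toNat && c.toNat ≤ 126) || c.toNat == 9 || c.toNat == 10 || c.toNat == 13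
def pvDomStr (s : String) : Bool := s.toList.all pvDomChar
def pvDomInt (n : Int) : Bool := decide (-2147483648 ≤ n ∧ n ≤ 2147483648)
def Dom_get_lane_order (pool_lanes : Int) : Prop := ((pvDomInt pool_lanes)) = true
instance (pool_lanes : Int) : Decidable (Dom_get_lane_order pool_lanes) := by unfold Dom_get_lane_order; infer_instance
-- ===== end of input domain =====

-- B replaces A's stateful pointer/toggle while-loop by two precomputed lane runs merged with a
-- zip-based interleave (objective: simpler; same O(n) cost).

-- ===== PORT A =====
-- one iteration of A's 'for _ in range(2)' body, on the state (order, r)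
def glaFor (p : Int) (st : List Int × Int) : List Int × Int :=
  if st.2 ≤ p - 1 ∧ (st.1.length : Int) < p then (st.1 ++ [st.2], st.2 + 1) else st

-- A's 'while len(order) < pool_lanes' loop; fuel bounds the iteration count (the loop runs
-- at most 2*pool_lanes times, so the fuel given in get_lane_order never runs out)
def glaLoop (p : Int) : Nat → List Int → Int → Int → Bool → List Int
  | 0, order, _, _, _ => order
  | fuel+1, order, r, l, goLeft =>
    if (order.length : Int) < p then
      if goLeft then
        if 0 ≤ l then glaLoop p fuel (order ++ [l]) r (l - 1) false
        else glaLoop p fuel order r l false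
      else
        if r ≤ p - 1 then glaLoop p fuel (order ++ [r]) (r + 1) l true
        else glaLoop p fuel order r l true
    else order

def get_lane_order (pool_lanes : Int) : List Int :=
  let center := PySem.Int.floordiv (pool_lanes - 1) 2
  let st := glaFor pool_lanes ([center], center + 1)
  let st := glaFor pool_lanes st
  glaLoop pool_lanes (2 * pool_lanes.toNat + 2) st.1 st.2 (center - 1) true

-- ===== PORT B =====
-- Source B's _interleave: pairwise zip run, then the leftover of whichever side survives
def pvInterleave (left right : List Int) : List Int :=
  let out := (left.zip right).foldl (fun out p => out ++ [p.1, p.2]) []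
  let k := min left.length right.length
  out ++ left.drop k ++ right.drop k

def get_lane_order_alt (pool_lanes : Int) : List Int :=
  let center := PySem.Int.floordiv (pool_lanes - 1) 2
  let right := PySem.List.pyRange (center + 1) pool_lanes 1
  let left := PySem.List.pyRange (center - 1) (-1) (-1)
  [center] ++ right.take 2 ++ pvInterleave left (right.drop 2)

-- ===== PRECONDITION & SPEC =====
def Spec_get_lane_order (pool_lanes : Int) (out : List Int) : Prop := out = get_lane_order_alt pool_lanes
instance (pool_lanes : Int) (out : List Int) : Decidable (Spec_get_lane_order pool_lanes out) := by unfold Spec_get_lane_order; infer_instance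

-- ===== CLAIM (what is proved, stated in full; the proofs are below) =====
def Claim_equal_get_lane_order : Prop := ∀ (pool_lanes : Int), Dom_get_lane_order pool_lanes → Spec_get_lane_order pool_lanes (get_lane_order pool_lanes)

-- ===== LEMMAS AND PROOFS =====

-- proof-side recursive view of alternation: take from the first list, then swap the lists
def itl : List Int → List Int → List Int
  | [], rs => rs
  | a :: ls, rs => a :: itl rs ls
  termination_by l r => l.length + r.length

lemma pvInterleave_nil_left (rs : List Int) : pvInterleave [] rs = rs := by
  simp [pvInterleave]

lemma pvInterleave_nil_right (ls : List Int) : pvInterleave ls [] = ls := by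
  simp [pvInterleave]

lemma pvInterleave_cons_cons (a b : Int) (ls rs : List Int) :
    pvInterleave (a :: ls) (b :: rs) = a :: b :: pvInterleave ls rs := by
  simp [pvInterleave, Nat.succ_min_succ]

lemma pvInterleave_eq_itl (n : Nat) :
    ∀ ls rs : List Int, ls.length + rs.length ≤ n → pvInterleave ls rs = itl ls rs := by
  induction n with
  | zero =>
    intro ls rs h
    have hls : ls = [] := by cases ls <;> simp_all
    have hrs : rs = [] := by cases rs <;> simp_all
    subst hls; subst hrs
    simp [pvInterleave, itl]
  | succ n ih =>
    intro ls rs h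
    cases ls with
    | nil => simp [pvInterleave_nil_left, itl]
    | cons a ls' =>
      cases rs with
      | nil => simp [pvInterleave_nil_right, itl]
      | cons b rs' =>
        rw [pvInterleave_cons_cons]
        have : pvInterleave ls' rs' = itl ls' rs' := by
          apply ih; simp at h ⊢; omega
        rw [this]
        simp [itl]

-- tail phase of A's loop once the left side is exhausted (l = -1): drains the right run
lemma glaLoop_tailR (p : Int) :
    ∀ (fuel : Nat) (r : Int) (order : List Int) (b : Bool),
      (order.length : Int) = r → r ≤ p →
      (fuel : Int) ≥ 2 * (p - r) - (if b then 0 else 1) →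
      glaLoop p fuel order r (-1) b = order ++ PySem.List.pyRange r p 1 := by
  intro fuel
  induction fuel with
  | zero =>
    intro r order b hlen hr hfuel
    have : p ≤ r := by split at hfuel <;> omega
    rw [PySem.List.pyRange_one_eq_nil (by omega)]
    simp [glaLoop]
  | succ fuel ih =>
    intro r order b hlen hr hfuel
    by_cases hlt : r < p
    · cases b with
      | true =>
        have hstep : glaLoop p (fuel+1) order r (-1) true = glaLoop p fuel order r (-1) false := by
          simp [glaLoop, hlen, hlt]
        have hf : (fuel : Int) ≥ 2 * (p - r) - (if false then 0 else 1) := by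
          simp at hfuel ⊢; omega
        rw [hstep, ih r order false hlen hr hf]
      | false =>
        have hr0 : r ≤ p - 1 := by omega
        have hstep : glaLoop p (fuel+1) order r (-1) false
            = glaLoop p fuel (order ++ [r]) (r+1) (-1) true := by
          simp [glaLoop, hlen, hlt, hr0]
        have hlen' : (((order ++ [r]).length : Int)) = r + 1 := by simp; omega
        have hf : (fuel : Int) ≥ 2 * (p - (r+1)) - (if true then 0 else 1) := by
          simp at hfuel ⊢; omega
        rw [hstep, ih (r+1) (order ++ [r]) true hlen' (by omega) hf]
        have hcons : PySem.List.pyRange r p 1 = r :: PySem.List.pyRange (r+1) p 1 :=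
          PySem.List.pyRange_one_cons hlt
        rw [hcons]
        simp
    · have hstop : ¬ ((order.length : Int) < p) := by omega
      rw [PySem.List.pyRange_one_eq_nil (by omega)]
      simp [glaLoop, hstop]

-- tail phase of A's loop once the right side is exhausted (r = p): drains the left run
lemma glaLoop_tailL (p : Int) :
    ∀ (fuel : Nat) (l : Int) (order : List Int) (b : Bool),
      (order.length : Int) = p - (l + 1) → -1 ≤ l →
      (fuel : Int) ≥ 2 * (l + 1) - (if b then 1 else 0) →
      glaLoop p fuel order p l b = order ++ PySem.List.pyRange l (-1) (-1) := by
  intro fuel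
  induction fuel with
  | zero =>
    intro l order b hlen hl hfuel
    have : l = -1 := by split at hfuel <;> omega
    subst this
    rw [PySem.List.pyRange_neg_one_eq_nil (by omega)]
    simp [glaLoop]
  | succ fuel ih =>
    intro l order b hlen hl hfuel
    by_cases hlt : 0 ≤ l
    · have hcond : (order.length : Int) < p := by omega
      cases b with
      | true =>
        have hstep : glaLoop p (fuel+1) order p l true
            = glaLoop p fuel (order ++ [l]) p (l-1) false := by
          simp [glaLoop, hcond, hlt]
        have hlen' : (((order ++ [l]).length : Int)) = p - ((l-1) + 1) := by simp; omega
        have hf : (fuel : Int) ≥ 2 * ((l-1) + 1) - (if false then 1 else 0) := by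
          simp at hfuel ⊢; omega
        rw [hstep, ih (l-1) (order ++ [l]) false hlen' (by omega) hf]
        have hcons : PySem.List.pyRange l (-1) (-1) = l :: PySem.List.pyRange (l-1) (-1) (-1) :=
          PySem.List.pyRange_neg_one_cons (by omega)
        rw [hcons]
        simp
      | false =>
        have hnr : ¬ (p ≤ p - 1) := by omega
        have hstep : glaLoop p (fuel+1) order p l false = glaLoop p fuel order p l true := by
          simp [glaLoop, hcond, hnr]
        have hf : (fuel : Int) ≥ 2 * (l + 1) - (if true then 1 else 0) := by
          simp at hfuel ⊢; omega
        rw [hstep, ih l order true hlen hl hf]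
    · have hl' : l = -1 := by omega
      subst hl'
      have hstop : ¬ ((order.length : Int) < p) := by omega
      rw [PySem.List.pyRange_neg_one_eq_nil (by omega)]
      simp [glaLoop, hstop]

-- the alternating phase of A's loop produces exactly the interleave of the two remaining runs
lemma glaLoop_main (p : Int) :
    ∀ (fuel : Nat) (l r : Int) (order : List Int) (b : Bool),
      -1 ≤ l → r ≤ p → (order.length : Int) = r - l - 1 →
      (fuel : Int) ≥ 2 * ((l + 1) + (p - r)) →
      glaLoop p fuel order r l b
        = order ++ (if b then itl (PySem.List.pyRange l (-1) (-1)) (PySem.List.pyRange r p 1)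
                    else itl (PySem.List.pyRange r p 1) (PySem.List.pyRange l (-1) (-1))) := by
  intro fuel
  induction fuel with
  | zero =>
    intro l r order b hl hr hlen hfuel
    rw [PySem.List.pyRange_neg_one_eq_nil (by omega), PySem.List.pyRange_one_eq_nil (by omega)]
    cases b <;> simp [glaLoop, itl]
  | succ fuel ih =>
    intro l r order b hl hr hlen hfuel
    by_cases hm : 0 < (l + 1) + (p - r)
    · have hcond : (order.length : Int) < p := by omega
      cases b with
      | true =>
        by_cases hl0 : 0 ≤ l
        · have hstep : glaLoop p (fuel+1) order r l true
              = glaLoop p fuel (order ++ [l]) r (l-1) false := by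
            simp [glaLoop, hcond, hl0]
          have hlen' : (((order ++ [l]).length : Int)) = r - (l-1) - 1 := by simp; omega
          have hf : (fuel : Int) ≥ 2 * (((l-1) + 1) + (p - r)) := by
            simp at hfuel ⊢; omega
          rw [hstep, ih (l-1) r (order ++ [l]) false (by omega) hr hlen' hf]
          have hcons : PySem.List.pyRange l (-1) (-1) = l :: PySem.List.pyRange (l-1) (-1) (-1) :=
            PySem.List.pyRange_neg_one_cons (by omega)
          rw [hcons]
          simp [itl]
        · have hl' : l = -1 := by omega
          subst hl'
          have hstep : glaLoop p (fuel+1) order r (-1) true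
              = glaLoop p fuel order r (-1) false := by
            simp [glaLoop, hcond]
          have hf : (fuel : Int) ≥ 2 * (p - r) - (if false then 0 else 1) := by
            simp at hfuel ⊢; omega
          rw [hstep, glaLoop_tailR p fuel r order false (by omega) hr hf]
          rw [PySem.List.pyRange_neg_one_eq_nil (by omega)]
          simp [itl]
      | false =>
        by_cases hr0 : r ≤ p - 1
        · have hstep : glaLoop p (fuel+1) order r l false
              = glaLoop p fuel (order ++ [r]) (r+1) l true := by
            simp [glaLoop, hcond, hr0]
          have hlen' : (((order ++ [r]).length : Int)) = (r+1) - l - 1 := by simp; omega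
          have hf : (fuel : Int) ≥ 2 * ((l + 1) + (p - (r+1))) := by
            simp at hfuel ⊢; omega
          rw [hstep, ih l (r+1) (order ++ [r]) true hl (by omega) hlen' hf]
          have hcons : PySem.List.pyRange r p 1 = r :: PySem.List.pyRange (r+1) p 1 :=
            PySem.List.pyRange_one_cons (by omega)
          rw [hcons]
          simp [itl]
        · have hr' : r = p := by omega
          have hstep : glaLoop p (fuel+1) order r l false = glaLoop p fuel order r l true := by
            simp [glaLoop, hcond, hr0]
          have hf : (fuel : Int) ≥ 2 * (l + 1) - (if true then 1 else 0) := by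
            simp at hfuel ⊢; omega
          rw [hstep, hr', glaLoop_tailL p fuel l order true (by omega) hl hf]
          rw [PySem.List.pyRange_one_eq_nil (by omega)]
          simp [itl]
    · have hstop : ¬ ((order.length : Int) < p) := by omega
      rw [PySem.List.pyRange_neg_one_eq_nil (by omega), PySem.List.pyRange_one_eq_nil (by omega)]
      cases b <;> simp [glaLoop, hstop, itl]

-- ===== VERDICT (by name: the statement is the Claim_ definition above) =====
theorem get_lane_order_spec : Claim_equal_get_lane_order := by
  intro p _
  unfold Spec_get_lane_order get_lane_order get_lane_order_alt
  rw [PySem.Int.floordiv_eq_ediv_of_pos (by norm_num)]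
  dsimp only
  set c : Int := (p - 1) / 2 with hc
  by_cases hp : p ≤ 0
  · -- degenerate pools: both return [center]
    have hc0 : c ≤ 0 := by omega
    have e1 : glaFor p ([c], c + 1) = ([c], c + 1) := by
      unfold glaFor
      rw [if_neg]
      rintro ⟨h1, -⟩; omega
    rw [e1, e1]
    have hloop : glaLoop p (2 * p.toNat + 1 + 1) [c] (c + 1) (c - 1) true = [c] := by
      have hstop : ¬ ((1 : Int) < p) := by omega
      simp [glaLoop, hstop]
    rw [show (2 * p.toNat + 2 : Nat) = 2 * p.toNat + 1 + 1 from rfl, hloop]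
    rw [PySem.List.pyRange_one_eq_nil (by omega), PySem.List.pyRange_neg_one_eq_nil (by omega)]
    simp [pvInterleave_nil_left]
  · have hp1 : 1 ≤ p := by omega
    have hc0 : 0 ≤ c := by omega
    have hcp : c ≤ p - 1 := by omega
    have hfuel : ((2 * p.toNat + 2 : Nat) : Int) ≥ 2 * p := by
      push_cast; omega
    by_cases h1 : c + 1 ≤ p - 1
    · by_cases h2 : c + 2 ≤ p - 1
      · -- at least two lanes to the right of centre
        have e1 : glaFor p ([c], c + 1) = ([c, c + 1], c + 2) := by
          unfold glaFor
          rw [if_pos ⟨h1, by simp; omega⟩]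
          simp; omega
        have e2 : glaFor p ([c, c + 1], c + 2) = ([c, c + 1, c + 2], c + 3) := by
          unfold glaFor
          rw [if_pos ⟨h2, by simp; omega⟩]
          simp; omega
        rw [e1, e2]
        rw [glaLoop_main p _ (c - 1) (c + 3) _ true (by omega) (by omega) (by simp; try omega)
              (by omega)]
        rw [show PySem.List.pyRange (c+1) p 1 = (c+1) :: PySem.List.pyRange (c+1+1) p 1 from
              PySem.List.pyRange_one_cons (by omega)]
        rw [show PySem.List.pyRange (c+1+1) p 1 = (c+1+1) :: PySem.List.pyRange (c+1+1+1) p 1 from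
              PySem.List.pyRange_one_cons (by omega)]
        rw [pvInterleave_eq_itl ((PySem.List.pyRange (c-1) (-1) (-1)).length
              + (PySem.List.pyRange (c+1+1+1) p 1).length) _ _ (by simp)]
        have h3 : c + 1 + 1 + 1 = c + 3 := by ring
        have h2' : c + 1 + 1 = c + 2 := by ring
        rw [h3, h2']
        simp
      · -- exactly one lane to the right of centre
        have e1 : glaFor p ([c], c + 1) = ([c, c + 1], c + 2) := by
          unfold glaFor
          rw [if_pos ⟨h1, by simp; omega⟩]
          simp; omega
        have e2 : glaFor p ([c, c + 1], c + 2) = ([c, c + 1], c + 2) := by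
          unfold glaFor
          rw [if_neg]
          rintro ⟨ha, -⟩; omega
        rw [e1, e2]
        rw [glaLoop_main p _ (c - 1) (c + 2) _ true (by omega) (by omega) (by simp; try omega)
              (by omega)]
        rw [show PySem.List.pyRange (c+1) p 1 = (c+1) :: PySem.List.pyRange (c+1+1) p 1 from
              PySem.List.pyRange_one_cons (by omega)]
        rw [show PySem.List.pyRange (c+1+1) p 1 = ([] : List Int) from
              PySem.List.pyRange_one_eq_nil (by omega)]
        rw [pvInterleave_eq_itl ((PySem.List.pyRange (c-1) (-1) (-1)).length) _ _ (by simp)]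
        rw [show PySem.List.pyRange (c+2) p 1 = ([] : List Int) from
              PySem.List.pyRange_one_eq_nil (by omega)]
        simp
    · -- no lane to the right of centre
      have e1 : glaFor p ([c], c + 1) = ([c], c + 1) := by
        unfold glaFor
        rw [if_neg]
        rintro ⟨ha, -⟩; omega
      rw [e1, e1]
      rw [glaLoop_main p _ (c - 1) (c + 1) _ true (by omega) (by omega) (by simp; try omega)
            (by omega)]
      rw [show PySem.List.pyRange (c+1) p 1 = ([] : List Int) from
            PySem.List.pyRange_one_eq_nil (by omega)]
      rw [pvInterleave_eq_itl ((PySem.List.pyRange (c-1) (-1) (-1)).length) _ _ (by simp)]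
      simp
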